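-- pv_equiv track=rewrite | github.com/ashnair1/COCO-Assistant | coco_assistant/utils/remapper.py | remap_annotations
-- ===== SOURCE A (Python) =====
-- def remap_annotations(ann, overlaps, new_cats):
--     """
--     Remaps the annotation where overlapping category ids
--     are mapped to reference category ids and new categories
--     are given new ids.
--
--     Args:
--         ann (dict): Annotation being modified
--         overlaps (dict): Mapping of overlapping categories
--         new_cats (dict): Mapping of new categories
--
--     Returns:
--         ann: Remapped annotation
--     """
--
--     for a in ann:
--         cat_id = a["category_id"]
--         # The category is either new or exists in the reference annotation
--         if cat_id in new_cats:
--             a["category_id"] = new_cats[a["category_id"]]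
--         else:
--             a["category_id"] = overlaps[a["category_id"]]
--     return ann
-- ===== SOURCE B (Python) =====
-- def remap_annotations(ann, overlaps, new_cats):
--     """Group-by re-implementation: bucket annotations by category id, then
--     resolve each distinct category once (new_cats taking precedence, else
--     overlaps) and write the resolved id to every annotation in the bucket.
--     Mutates the annotation dicts in place and returns ann, like the original.
--     """
--     groups = {}
--     for a in ann:
--         groups.setdefault(a["category_id"], []).append(a)
--     for cat_id, group in groups.items():
--         if cat_id in new_cats:
--             new_id = new_cats[cat_id]
--         else:
--             new_id = overlaps[cat_id]
--         for a in group: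
--             a["category_id"] = new_id
--     return ann
-- ===== Notes on version B (the rewrite author's own statement) =====
-- stated objective: alternative
-- what changed: Replaces A's per-annotation two-table branch by a group-by algorithm: one pass buckets annotations by category id, then each distinct category is resolved once and the result written to its whole bucket.
import Mathlib
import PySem

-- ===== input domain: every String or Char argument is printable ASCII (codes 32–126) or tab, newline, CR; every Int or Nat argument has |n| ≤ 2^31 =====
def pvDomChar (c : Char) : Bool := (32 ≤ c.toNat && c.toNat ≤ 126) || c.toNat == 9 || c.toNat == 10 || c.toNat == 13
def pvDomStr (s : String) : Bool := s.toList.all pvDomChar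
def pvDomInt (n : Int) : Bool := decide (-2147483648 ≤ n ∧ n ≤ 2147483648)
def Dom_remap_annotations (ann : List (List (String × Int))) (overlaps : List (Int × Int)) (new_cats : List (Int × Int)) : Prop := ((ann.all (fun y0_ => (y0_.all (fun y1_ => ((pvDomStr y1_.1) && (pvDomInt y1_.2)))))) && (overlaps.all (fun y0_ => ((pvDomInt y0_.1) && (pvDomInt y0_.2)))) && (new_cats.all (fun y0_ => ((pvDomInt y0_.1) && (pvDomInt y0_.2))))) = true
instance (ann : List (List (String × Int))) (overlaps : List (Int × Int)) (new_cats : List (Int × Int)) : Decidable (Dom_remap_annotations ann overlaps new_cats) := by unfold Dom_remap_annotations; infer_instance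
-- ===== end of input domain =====

-- B replaces A's per-annotation two-table branch by a group-by algorithm: bucket the
-- annotations by category id, then resolve each distinct category ONCE and write the
-- result to the whole bucket (alternative decomposition, same cost class).
-- Both Pythons mutate the annotation dicts in place and return ann; the equivalence
-- proved here is about the returned value (the mutation is modelled by index updates).

-- ===== PORT A =====
-- One iteration of A's loop body: read a["category_id"], branch on membership in
-- new_cats, assign the looked-up value back. The .getD 0 defaults are only reached
-- where Python raises KeyError (excluded by Pre_).
def remapA_one (overlaps : List (Int × Int)) (new_cats : List (Int × Int)) (a : List (String × Int)) : List (String × Int) :=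
  let cat_id := ((PySem.Dict.mk a).get? "category_id").getD 0
  if (PySem.Dict.mk new_cats).contains cat_id then
    ((PySem.Dict.mk a).insert "category_id" (((PySem.Dict.mk new_cats).get? cat_id).getD 0)).items
  else
    ((PySem.Dict.mk a).insert "category_id" (((PySem.Dict.mk overlaps).get? cat_id).getD 0)).items

def remap_annotations (ann : List (List (String × Int))) (overlaps : List (Int × Int)) (new_cats : List (Int × Int)) : List (List (String × Int)) :=
  ann.map (remapA_one overlaps new_cats)

-- ===== PORT B =====
-- Phase 1: groups.setdefault(a["category_id"], []).append(a) — since the Python stores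
-- the annotation OBJECTS (aliases into ann), the port buckets their INDICES (zipIdx).
-- Phase 2: for each (cat_id, group) in insertion order, resolve cat_id once (new_cats
-- first, else overlaps) and write the new id into every bucketed annotation in place
-- (the in-place mutation is modelled by List.set at the bucketed indices).
def remap_annotations_alt (ann : List (List (String × Int))) (overlaps : List (Int × Int)) (new_cats : List (Int × Int)) : List (List (String × Int)) :=
  let groups : PySem.Dict Int (List Nat) :=
    ann.zipIdx.foldl (fun g p =>
      g.modify (((PySem.Dict.mk p.1).get? "category_id").getD 0) [] (· ++ [p.2]))
      PySem.Dict.empty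
  groups.items.foldl (fun res q =>
    let new_id := if (PySem.Dict.mk new_cats).contains q.1
      then ((PySem.Dict.mk new_cats).get? q.1).getD 0
      else ((PySem.Dict.mk overlaps).get? q.1).getD 0
    q.2.foldl (fun res i => res.set i (((PySem.Dict.mk (res.getD i [])).insert "category_id" new_id).items)) res)
    ann

-- ===== PRECONDITION & SPEC =====
-- Pre_ excludes inputs where the Python A raises KeyError (an annotation without a
-- "category_id" key, or whose category id is in neither new_cats nor overlaps), and
-- overlaps/new_cats lists with duplicate keys, which do not represent any Python dict.
def Pre_remap_annotations (ann : List (List (String × Int))) (overlaps : List (Int × Int)) (new_cats : List (Int × Int)) : Prop :=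
  (overlaps.map Prod.fst).Nodup ∧ (new_cats.map Prod.fst).Nodup ∧
  ∀ a ∈ ann, (((PySem.Dict.mk a).get? "category_id").any
    (fun c => (PySem.Dict.mk new_cats).contains c || (PySem.Dict.mk overlaps).contains c)) = true

instance (ann : List (List (String × Int))) (overlaps : List (Int × Int)) (new_cats : List (Int × Int)) : Decidable (Pre_remap_annotations ann overlaps new_cats) := by unfold Pre_remap_annotations; infer_instance

def pvWitness_remap_annotations : (List (List (String × Int))) × (List (Int × Int)) × (List (Int × Int)) :=
  ([[("category_id", 1), ("x", 7)], [("category_id", 3)], [("category_id", 1)]], [(1, 2)], [(3, 4)])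

def Spec_remap_annotations (ann : List (List (String × Int))) (overlaps : List (Int × Int)) (new_cats : List (Int × Int)) (out : List (List (String × Int))) : Prop := out = remap_annotations_alt ann overlaps new_cats
instance (ann : List (List (String × Int))) (overlaps : List (Int × Int)) (new_cats : List (Int × Int)) (out : List (List (String × Int))) : Decidable (Spec_remap_annotations ann overlaps new_cats out) := by unfold Spec_remap_annotations; infer_instance

-- ===== CLAIM (what is proved, stated in full; the proofs are below) =====
def Claim_equal_remap_annotations : Prop := ∀ (ann : List (List (String × Int))) (overlaps : List (Int × Int)) (new_cats : List (Int × Int)), Dom_remap_annotations ann overlaps new_cats → Pre_remap_annotations ann overlaps new_cats → Spec_remap_annotations ann overlaps new_cats (remap_annotations ann overlaps new_cats)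

-- ===== LEMMAS AND PROOFS =====

-- the category id read from one annotation
def pvCat (a : List (String × Int)) : Int := ((PySem.Dict.mk a).get? "category_id").getD 0

-- the id a category is remapped to (new_cats first, else overlaps)
def pvTgt (overlaps : List (Int × Int)) (new_cats : List (Int × Int)) (c : Int) : Int :=
  if (PySem.Dict.mk new_cats).contains c
  then ((PySem.Dict.mk new_cats).get? c).getD 0
  else ((PySem.Dict.mk overlaps).get? c).getD 0

-- one in-place update of an annotation with the resolved id t
def pvUpd (t : Int) (a : List (String × Int)) : List (String × Int) :=
  ((PySem.Dict.mk a).insert "category_id" t).items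

-- (category, index) pairs, the grouping dict and the bucket of one category
def pvPairs (ann : List (List (String × Int))) : List (Int × Nat) :=
  ann.zipIdx.map (fun p => (pvCat p.1, p.2))
def pvGroups (ann : List (List (String × Int))) : PySem.Dict Int (List Nat) :=
  (pvPairs ann).foldl (fun d p => d.modify p.1 [] (· ++ [p.2])) PySem.Dict.empty
def pvGIdx (ann : List (List (String × Int))) (c : Int) : List Nat :=
  ((pvPairs ann).filter (fun p => p.1 == c)).map Prod.snd

theorem remapA_one_eq (overlaps new_cats : List (Int × Int)) (a : List (String × Int)) :
    remapA_one overlaps new_cats a = pvUpd (pvTgt overlaps new_cats (pvCat a)) a := by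
  simp only [remapA_one, pvUpd, pvTgt, pvCat]
  split_ifs <;> rfl

-- B's inner write loop: sets the bucketed indices, leaves everything else unchanged
theorem inner_fold (t : Int) (idxs : List Nat) (res : List (List (String × Int)))
    (hn : idxs.Nodup) :
    (idxs.foldl (fun res i => res.set i (((PySem.Dict.mk (res.getD i [])).insert "category_id" t).items)) res).length = res.length ∧
    ∀ j : Nat,
      (idxs.foldl (fun res i => res.set i (((PySem.Dict.mk (res.getD i [])).insert "category_id" t).items)) res)[j]?
      = if j ∈ idxs then (res[j]?).map (pvUpd t) else res[j]? := by
  induction idxs generalizing res with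
  | nil => simp
  | cons i idxs ih =>
    simp only [List.nodup_cons] at hn
    simp only [List.foldl_cons]
    obtain ⟨ihlen, ihget⟩ := ih (res.set i (((PySem.Dict.mk (res.getD i [])).insert "category_id" t).items)) hn.2
    refine ⟨by rw [ihlen, List.length_set], fun j => ?_⟩
    rw [ihget j]
    by_cases hji : j = i
    · subst hji
      rw [if_neg hn.1, if_pos (List.mem_cons_self ..)]
      rw [List.getElem?_set, if_pos rfl]
      by_cases hlt : j < res.length
      · rw [if_pos hlt, List.getElem?_eq_getElem hlt]
        have hgd : res.getD j [] = res[j] := by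
          rw [List.getD_eq_getElem?_getD, List.getElem?_eq_getElem hlt]; rfl
        rw [hgd]; rfl
      · rw [if_neg hlt, List.getElem?_eq_none (by omega)]; rfl
    · have hij : ¬ (i = j) := fun h => hji h.symm
      rw [List.getElem?_set, if_neg hij]
      by_cases hmem : j ∈ idxs
      · rw [if_pos hmem, if_pos (List.mem_cons.mpr (Or.inr hmem))]
      · rw [if_neg hmem, if_neg (show ¬ j ∈ i :: idxs by simp [List.mem_cons, hji, hmem])]

-- B's outer loop over the distinct categories in ks: every annotation whose category
-- lies in ks (still untouched in res) gets its resolved id; the rest is unchanged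
theorem outer_fold (ann : List (List (String × Int))) (overlaps new_cats : List (Int × Int))
    (gIdx : Int → List Nat)
    (hg : ∀ c, ∀ i ∈ gIdx c, ∃ h : i < ann.length, pvCat ann[i] = c)
    (hgn : ∀ c, (gIdx c).Nodup)
    (hcomp : ∀ j, (hj : j < ann.length) → j ∈ gIdx (pvCat ann[j])) :
    ∀ (ks : List Int) (res : List (List (String × Int))), ks.Nodup →
    res.length = ann.length →
    (∀ j, (hj : j < ann.length) → pvCat ann[j] ∈ ks → res[j]? = some ann[j]) →
    (ks.foldl (fun res c => (gIdx c).foldl (fun res i => res.set i (((PySem.Dict.mk (res.getD i [])).insert "category_id" (pvTgt overlaps new_cats c)).items)) res) res).length = ann.length ∧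
    ∀ j, (hj : j < ann.length) →
      (ks.foldl (fun res c => (gIdx c).foldl (fun res i => res.set i (((PySem.Dict.mk (res.getD i [])).insert "category_id" (pvTgt overlaps new_cats c)).items)) res) res)[j]?
      = if pvCat ann[j] ∈ ks
        then some (pvUpd (pvTgt overlaps new_cats (pvCat ann[j])) ann[j])
        else res[j]? := by
  intro ks
  induction ks with
  | nil => intro res _ hlen _; exact ⟨hlen, fun j hj => by simp⟩
  | cons c ks ih =>
    intro res hkn hlen hres
    simp only [List.nodup_cons] at hkn
    simp only [List.foldl_cons]
    obtain ⟨ilen, iget⟩ := inner_fold (pvTgt overlaps new_cats c) (gIdx c) res (hgn c)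
    have hres1 : ∀ j, (hj : j < ann.length) → pvCat ann[j] ∈ ks →
        ((gIdx c).foldl (fun res i => res.set i (((PySem.Dict.mk (res.getD i [])).insert "category_id" (pvTgt overlaps new_cats c)).items)) res)[j]? = some ann[j] := by
      intro j hj hjks
      have hc : pvCat ann[j] ≠ c := fun h => hkn.1 (h ▸ hjks)
      have hnmem : j ∉ gIdx c := fun h => hc ((hg c j h).2)
      rw [iget j, if_neg hnmem]
      exact hres j hj (List.mem_cons.mpr (Or.inr hjks))
    obtain ⟨flen, fget⟩ := ih _ hkn.2 (by rw [ilen]; exact hlen) hres1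
    refine ⟨flen, fun j hj => ?_⟩
    rw [fget j hj]
    by_cases hks : pvCat ann[j] ∈ ks
    · rw [if_pos hks, if_pos (List.mem_cons.mpr (Or.inr hks))]
    · rw [if_neg hks]
      by_cases hc : pvCat ann[j] = c
      · rw [if_pos (List.mem_cons.mpr (Or.inl hc)), iget j, if_pos (hc ▸ hcomp j hj),
          hres j hj (List.mem_cons.mpr (Or.inl hc)), hc]
        rfl
      · rw [if_neg (by simp [List.mem_cons, hc, hks]), iget j,
          if_neg (fun h => hc ((hg c j h).2))]

-- membership in the (category, index) pair list
theorem mem_pvPairs (ann : List (List (String × Int))) (c : Int) (i : Nat) :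
    (c, i) ∈ pvPairs ann ↔ ∃ h : i < ann.length, pvCat ann[i] = c := by
  unfold pvPairs
  simp only [List.mem_map, Prod.mk.injEq]
  constructor
  · rintro ⟨p, hmem, hc, hk⟩
    subst hk
    have hget : ann[p.2]? = some p.1 := List.mk_mem_zipIdx_iff_getElem?.mp hmem
    have hlt : p.2 < ann.length := by
      by_contra h
      rw [List.getElem?_eq_none (by omega)] at hget
      simp at hget
    rw [List.getElem?_eq_getElem hlt] at hget
    exact ⟨hlt, by rw [Option.some.inj hget]; exact hc⟩
  · rintro ⟨hlt, hc⟩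
    exact ⟨(ann[i], i), List.mk_mem_zipIdx_iff_getElem?.mpr (List.getElem?_eq_getElem hlt), hc, rfl⟩

theorem remap_annotations_spec : Claim_equal_remap_annotations := by
  intro ann overlaps new_cats _ _
  unfold Spec_remap_annotations
  -- B's grouping fold is the fold over the (category, index) pairs
  have halt : remap_annotations_alt ann overlaps new_cats
      = (pvGroups ann).items.foldl (fun res q => q.2.foldl (fun res i => res.set i (((PySem.Dict.mk (res.getD i [])).insert "category_id" (pvTgt overlaps new_cats q.1)).items)) res) ann := by
    unfold remap_annotations_alt pvGroups pvPairs pvTgt pvCat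
    rw [List.foldl_map]
  have hkn : (pvGroups ann).keys.Nodup := by
    unfold pvGroups
    exact PySem.Dict.nodup_keys_foldl_modify_key (pvPairs ann) Prod.fst []
      (fun d p => (· ++ [p.2])) PySem.Dict.empty PySem.Dict.nodup_keys_empty
  have hgetD : ∀ c, (pvGroups ann).getD c [] = pvGIdx ann c := by
    intro c
    unfold pvGroups pvGIdx
    rw [PySem.Dict.getD_foldl_modify_append, PySem.Dict.getD_empty]
    simp
  have hitems : (pvGroups ann).items = (pvGroups ann).keys.map (fun c => (c, pvGIdx ann c)) := by
    rw [PySem.Dict.items_eq_map_keys (pvGroups ann) hkn []]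
    exact List.map_congr_left (fun c _ => by rw [hgetD c])
  have halt2 : remap_annotations_alt ann overlaps new_cats
      = (pvGroups ann).keys.foldl (fun res c => (pvGIdx ann c).foldl (fun res i => res.set i (((PySem.Dict.mk (res.getD i [])).insert "category_id" (pvTgt overlaps new_cats c)).items)) res) ann := by
    rw [halt, hitems, List.foldl_map]
  -- bucket facts
  have hg : ∀ c, ∀ i ∈ pvGIdx ann c, ∃ h : i < ann.length, pvCat ann[i] = c := by
    intro c i hi
    unfold pvGIdx at hi
    simp only [List.mem_map, List.mem_filter] at hi
    obtain ⟨⟨c', i'⟩, ⟨hmem, hc⟩, hi'⟩ := hi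
    subst hi'
    exact (mem_pvPairs ann c i').mp (beq_iff_eq.mp hc ▸ hmem)
  have hgn : ∀ c, (pvGIdx ann c).Nodup := by
    intro c
    unfold pvGIdx
    refine List.Nodup.sublist (List.Sublist.map Prod.snd List.filter_sublist) ?_
    have : (pvPairs ann).map Prod.snd = ann.zipIdx.map Prod.snd := by
      unfold pvPairs; rw [List.map_map]; rfl
    rw [this]
    simp only [List.zipIdx_map_snd]
    exact List.nodup_range'
  have hcomp : ∀ j, (hj : j < ann.length) → j ∈ pvGIdx ann (pvCat ann[j]) := by
    intro j hj
    unfold pvGIdx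
    simp only [List.mem_map, List.mem_filter]
    exact ⟨(pvCat ann[j], j), ⟨(mem_pvPairs ann _ j).mpr ⟨hj, rfl⟩, by simp⟩, rfl⟩
  -- coverage: every annotation's category is a key of the grouping dict
  have hkeys : ∀ j, (hj : j < ann.length) → pvCat ann[j] ∈ (pvGroups ann).keys := by
    intro j hj
    unfold pvGroups
    rw [PySem.Dict.keys_foldl_modify_key (pvPairs ann) Prod.fst]
    rw [PySem.Set.mem_update]
    right
    exact List.mem_map.mpr ⟨(pvCat ann[j], j), (mem_pvPairs ann _ j).mpr ⟨hj, rfl⟩, rfl⟩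
  obtain ⟨flen, fget⟩ := outer_fold ann overlaps new_cats (pvGIdx ann) hg hgn hcomp
    (pvGroups ann).keys ann hkn rfl (fun j hj _ => List.getElem?_eq_getElem hj)
  rw [halt2]
  unfold remap_annotations
  apply List.ext_getElem?
  intro j
  by_cases hj : j < ann.length
  · rw [fget j hj, if_pos (hkeys j hj), List.getElem?_map, List.getElem?_eq_getElem hj]
    simp only [Option.map_some]
    rw [remapA_one_eq]
  · rw [List.getElem?_eq_none (l := ann.map (remapA_one overlaps new_cats)) (by simpa using (by omega : ann.length ≤ j)),
      List.getElem?_eq_none (by omega)]
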